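-- pv_equiv track=rewrite | github.com/Mateaaaal/flashcards_app | streamlit_app.py | generate_qa_from_text_by_lines
-- ===== SOURCE A (Python) =====
-- from typing import List, Optional
--
-- def generate_qa_from_text_by_lines(text: str) -> List[dict]:
--     results = []
--     lines = [l.strip() for l in text.splitlines() if l.strip()]
--     for i, line in enumerate(lines):
--         if ":" in line and len(line.split(":")[0]) < 100:
--             left, right = line.split(":", 1)
--             question = left.strip()
--             answer = right.strip()
--             j = i + 1
--             while j < min(i + 4, len(lines)) and not (":" in lines[j] and len(lines[j].split(":")[0]) < 100):
--                 if len(lines[j]) < 200: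
--                     answer += " " + lines[j]
--                 j += 1
--             results.append({"question": question, "answer": answer})
--     return results
-- ===== SOURCE B (Python) =====
-- from typing import List
--
-- def generate_qa_from_text_by_lines(text: str) -> List[dict]:
--     results = []
--     remaining = 0
--     for raw in text.splitlines():
--         line = raw.strip()
--         if not line:
--             continue
--         if ":" in line and len(line.split(":")[0]) < 100:
--             left, right = line.split(":", 1)
--             results.append({"question": left.strip(), "answer": right.strip()})
--             remaining = 3
--         elif remaining > 0:
--             remaining -= 1
--             if len(line) < 200:
--                 results[-1]["answer"] += " " + line
--     return results
-- ===== Notes on version B (the rewrite author's own statement) =====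
-- stated objective: simpler
-- what changed: Replaced the per-header backward re-scan (inner while over lines[j] with index arithmetic) by a single forward pass that keeps a continuation budget and appends to the last emitted dict, processing each raw line exactly once without materialising the stripped-lines list.
import Mathlib
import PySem

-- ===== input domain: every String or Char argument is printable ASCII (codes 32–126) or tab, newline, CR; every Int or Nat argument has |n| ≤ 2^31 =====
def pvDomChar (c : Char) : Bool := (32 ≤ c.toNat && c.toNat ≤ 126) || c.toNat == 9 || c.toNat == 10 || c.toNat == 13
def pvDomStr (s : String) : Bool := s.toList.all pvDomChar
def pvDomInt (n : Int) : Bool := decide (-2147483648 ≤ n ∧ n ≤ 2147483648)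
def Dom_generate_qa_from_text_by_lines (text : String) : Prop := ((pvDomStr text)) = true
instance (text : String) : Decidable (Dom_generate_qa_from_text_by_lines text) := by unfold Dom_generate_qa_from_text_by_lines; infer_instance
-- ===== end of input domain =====

-- B replaces A's per-header backward window re-scan by a single forward pass with a
-- continuation budget appending to the last emitted dict (objective: simpler).

-- ===== PORT A =====
-- ':' in line and len(line.split(':')[0]) < 100   (the identical expression occurs in both Pythons)
def pvIsHeader (line : String) : Bool :=
  PySem.Str.isIn ":" line &&
    decide (PySem.Str.len (((PySem.Str.split? line ":").getD []).headD "") < 100)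

-- left, right = line.split(':', 1); (left.strip(), right.strip())  (identical in both Pythons)
def pvQA (line : String) : String × String :=
  let parts := (PySem.Str.splitMax? line ":" 1).getD []
  (PySem.Str.strip (parts.headD ""), PySem.Str.strip (parts.getD 1 ""))

-- lines = [l.strip() for l in text.splitlines() if l.strip()]
def pvLinesA (text : String) : List String :=
  (PySem.Str.splitlines text).filterMap (fun l =>
    if PySem.Str.strip l = "" then none else some (PySem.Str.strip l))

-- the inner while loop: j, answer mutate; stop = min(i + 4, len(lines))
def pvWhileA (lines : List String) (stop j : Int) (answer : String) : String :=
  if _ : j < stop ∧ ¬ pvIsHeader (PySem.List.pyGetD lines j "") then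
    pvWhileA lines stop (j + 1)
      (if PySem.Str.len (PySem.List.pyGetD lines j "") < 200 then
        answer ++ (" " ++ PySem.List.pyGetD lines j "") else answer)
  else answer
termination_by (stop - j).toNat
decreasing_by omega

def generate_qa_from_text_by_lines (text : String) : List (List (String × String)) :=
  let lines := pvLinesA text
  (PySem.List.enumerate lines).foldl
    (fun results p =>
      let i := p.1
      let line := p.2
      if pvIsHeader line then
        let qa := pvQA line
        let answer := pvWhileA lines (min (i + 4) (lines.length : Int)) (i + 1) qa.2
        results ++ [[("question", qa.1), ("answer", answer)]]
      else results)
    []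

-- ===== PORT B =====
-- one step of B's loop body on the stripped, non-empty line
def pvStepB (st : List (List (String × String)) × Int) (line : String) :
    List (List (String × String)) × Int :=
  if pvIsHeader line then
    let qa := pvQA line
    ([("question", qa.1), ("answer", qa.2)] :: st.1, 3)
  else if st.2 > 0 then
    (if PySem.Str.len line < 200 then
        match st.1 with
        | d :: rest =>
            (d.map (fun p => if p.1 = "answer" then (p.1, p.2 ++ (" " ++ line)) else p)) :: rest
        | [] => st.1
      else st.1, st.2 - 1)
  else st

def generate_qa_from_text_by_lines_alt (text : String) : List (List (String × String)) :=
  let st := (PySem.Str.splitlines text).foldl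
    (fun st raw =>
      let line := PySem.Str.strip raw
      if line = "" then st else pvStepB st line)
    ([], 0)
  st.1.reverse

-- ===== PRECONDITION & SPEC =====
def Spec_generate_qa_from_text_by_lines (text : String) (out : List (List (String × String))) : Prop := out = generate_qa_from_text_by_lines_alt text
instance (text : String) (out : List (List (String × String))) : Decidable (Spec_generate_qa_from_text_by_lines text out) := by unfold Spec_generate_qa_from_text_by_lines; infer_instance

-- ===== CLAIM (what is proved, stated in full; the proofs are below) =====
def Claim_equal_generate_qa_from_text_by_lines : Prop := ∀ (text : String), Dom_generate_qa_from_text_by_lines text → Spec_generate_qa_from_text_by_lines text (generate_qa_from_text_by_lines text)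

-- ===== LEMMAS AND PROOFS =====

-- the answer-extension both programs compute: consume up to `fuel` non-header lines
def pvCollect : List String → Nat → String → String
  | _, 0, a => a
  | [], _ + 1, a => a
  | l :: ls, f + 1, a =>
      if pvIsHeader l then a
      else pvCollect ls f (if PySem.Str.len l < 200 then a ++ (" " ++ l) else a)

-- the common structural reading of both programs
def pvG : List String → List (List (String × String))
  | [] => []
  | x :: xs =>
      if pvIsHeader x then
        [("question", (pvQA x).1), ("answer", pvCollect xs 3 (pvQA x).2)] :: pvG xs
      else pvG xs

theorem pvCollect_min (xs : List String) : ∀ (f : Nat) (a : String),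
    pvCollect xs f a = pvCollect xs (min f xs.length) a := by
  induction xs with
  | nil => intro f a; cases f <;> rfl
  | cons x xs ih =>
      intro f a
      cases f with
      | zero => rfl
      | succ f =>
        rw [List.length_cons, Nat.succ_min_succ]
        simp only [pvCollect]
        split
        · rfl
        · exact ih f _

theorem pvWhileA_eq_collect (lines : List String) : ∀ (n j : Nat) (stop : Int) (a : String),
    stop = (j : Int) + n → stop ≤ lines.length →
    pvWhileA lines stop j a = pvCollect (lines.drop j) n a := by
  intro n
  induction n with
  | zero =>
      intro j stop a hstop _
      rw [pvWhileA]
      have : ¬ ((j : Int) < stop ∧ ¬ pvIsHeader (PySem.List.pyGetD lines (j : Int) "")) := by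
        rintro ⟨h, -⟩; omega
      rw [dif_neg this]
      cases lines.drop j <;> rfl
  | succ n ih =>
      intro j stop a hstop hle
      have hjlt : j < lines.length := by omega
      have hdrop : lines.drop j = lines[j] :: lines.drop (j + 1) :=
        List.drop_eq_getElem_cons hjlt
      have hget : PySem.List.pyGetD lines (j : Int) "" = lines[j] := by
        rw [PySem.List.pyGetD_natCast]
        simp [List.getD, hjlt]
      rw [pvWhileA, hdrop]
      by_cases hh : pvIsHeader lines[j]
      · have : ¬ ((j : Int) < stop ∧ ¬ pvIsHeader (PySem.List.pyGetD lines (j : Int) "")) := by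
          rintro ⟨-, hc⟩; rw [hget] at hc; exact hc hh
        rw [dif_neg this]
        simp [pvCollect, hh]
      · have hc : ((j : Int) < stop ∧ ¬ pvIsHeader (PySem.List.pyGetD lines (j : Int) "")) := by
          refine ⟨by omega, by rw [hget]; exact hh⟩
        rw [dif_pos hc]
        have hc1 : ((j : Int) + 1) = ((j + 1 : Nat) : Int) := by push_cast; ring
        rw [hget, hc1, ih (j + 1) stop _ (by omega) hle]
        simp [pvCollect, hh]

-- A's outer fold, walked structurally over the suffix
theorem foldA_eq_pvG (lines : List String) : ∀ (suf : List String) (k : Nat)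
    (acc : List (List (String × String))), lines.drop k = suf →
    (PySem.List.enumerate suf (k : Int)).foldl
      (fun results p =>
        let i := p.1
        let line := p.2
        if pvIsHeader line then
          let qa := pvQA line
          let answer := pvWhileA lines (min (i + 4) (lines.length : Int)) (i + 1) qa.2
          results ++ [[("question", qa.1), ("answer", answer)]]
        else results)
      acc = acc ++ pvG suf := by
  intro suf
  induction suf with
  | nil => intro k acc _; simp [PySem.List.enumerate_nil, pvG]
  | cons x xs ih =>
      intro k acc hdrop
      have hklt : k < lines.length := by
        by_contra h
        rw [List.drop_eq_nil_of_le (by omega)] at hdrop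
        exact (List.cons_ne_nil x xs) hdrop.symm
      have hxs : lines.drop (k + 1) = xs := by
        rw [← List.tail_drop, hdrop]
        rfl
      have hxslen : xs.length = lines.length - (k + 1) := by
        have := congrArg List.length hxs
        simp at this
        omega
      rw [PySem.List.enumerate_cons, List.foldl_cons]
      by_cases hh : pvIsHeader x
      · have hcast : (k : Int) + 1 = ((k + 1 : Nat) : Int) := by push_cast; ring
        have hstop : (min ((k : Int) + 4) (lines.length : Int)) =
            ((k + 1 : Nat) : Int) + (min 3 xs.length : Nat) := by
          rcases le_total ((k : Int) + 4) (lines.length : Int) with h | h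
          · rw [min_eq_left h]; push_cast [Nat.cast_min]; omega
          · rw [min_eq_right h]; push_cast [Nat.cast_min]; omega
        have hW := pvWhileA_eq_collect lines (min 3 xs.length) (k + 1)
          (min ((k : Int) + 4) (lines.length : Int)) (pvQA x).2 hstop (min_le_right _ _)
        rw [hxs] at hW
        have hcoll : pvCollect xs (min 3 xs.length) (pvQA x).2 = pvCollect xs 3 (pvQA x).2 :=
          (pvCollect_min xs 3 (pvQA x).2).symm
        simp only [hh, if_true]
        rw [hcast, hW, hcoll, ih (k + 1) _ hxs]
        simp [pvG, hh]
      · simp only [hh, Bool.false_eq_true, if_false]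
        have hcast : (k : Int) + 1 = ((k + 1 : Nat) : Int) := by push_cast; ring
        rw [hcast, ih (k + 1) acc hxs]
        simp [pvG, hh]

theorem A_eq_pvG (text : String) :
    generate_qa_from_text_by_lines text = pvG (pvLinesA text) := by
  unfold generate_qa_from_text_by_lines
  have := foldA_eq_pvG (pvLinesA text) (pvLinesA text) 0 [] (by simp)
  simpa [PySem.List.enumerate] using this

-- B's fold from an in-progress state: the head dict absorbs pvCollect, the rest is pvG
theorem foldB_in_progress : ∀ (ls : List String) (q a : String)
    (rest : List (List (String × String))) (rem : Nat),
    ((ls.foldl pvStepB ([("question", q), ("answer", a)] :: rest, (rem : Int))).1).reverse =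
      rest.reverse ++ ([("question", q), ("answer", pvCollect ls rem a)] :: pvG ls) := by
  intro ls
  induction ls with
  | nil =>
      intro q a rest rem
      simp [pvG]
      cases rem <;> rfl
  | cons x xs ih =>
      intro q a rest rem
      rw [List.foldl_cons]
      by_cases hh : pvIsHeader x
      · have hstep : pvStepB ([("question", q), ("answer", a)] :: rest, (rem : Int)) x =
            ([("question", (pvQA x).1), ("answer", (pvQA x).2)] ::
              ([("question", q), ("answer", a)] :: rest), ((3 : Nat) : Int)) := by
          simp [pvStepB, hh]
        rw [hstep, ih (pvQA x).1 (pvQA x).2 _ 3]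
        have hcoll : pvCollect (x :: xs) rem a = a := by
          cases rem <;> simp [pvCollect, hh]
        simp [pvG, hh, hcoll]
      · cases rem with
        | zero =>
            have hstep : pvStepB ([("question", q), ("answer", a)] :: rest, ((0 : Nat) : Int)) x =
                ([("question", q), ("answer", a)] :: rest, ((0 : Nat) : Int)) := by
              simp [pvStepB, hh]
            rw [hstep, ih q a rest 0]
            simp [pvCollect, pvG, hh]
        | succ r =>
            have hstep : pvStepB ([("question", q), ("answer", a)] :: rest, ((r + 1 : Nat) : Int)) x =
                ([("question", q), ("answer",
                    if PySem.Str.len x < 200 then a ++ (" " ++ x) else a)] :: rest,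
                  ((r : Nat) : Int)) := by
              simp only [pvStepB, hh, Bool.false_eq_true, if_false]
              have hpos : ((r + 1 : Nat) : Int) > 0 := by positivity
              rw [if_pos hpos]
              have : ((r + 1 : Nat) : Int) - 1 = ((r : Nat) : Int) := by push_cast; ring
              split <;> simp
            rw [hstep, ih q _ rest r]
            simp only [pvCollect, pvG, hh, Bool.false_eq_true, if_false]
  
theorem foldB_initial (ls : List String) :
    ((ls.foldl pvStepB ([], (0 : Int))).1).reverse = pvG ls := by
  induction ls with
  | nil => rfl
  | cons x xs ih =>
      rw [List.foldl_cons]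
      by_cases hh : pvIsHeader x
      · have hstep : pvStepB ([], (0 : Int)) x =
            ([("question", (pvQA x).1), ("answer", (pvQA x).2)] :: [], ((3 : Nat) : Int)) := by
          simp [pvStepB, hh]
        rw [hstep, foldB_in_progress xs (pvQA x).1 (pvQA x).2 [] 3]
        simp [pvG, hh]
      · have hstep : pvStepB ([], (0 : Int)) x = ([], (0 : Int)) := by
          simp [pvStepB, hh]
        rw [hstep, ih]
        simp [pvG, hh]

-- B's raw loop (strip + skip-empty) equals the fold over the stripped non-empty lines
theorem foldB_raw_eq_clean (raws : List String) :
    ∀ (st : List (List (String × String)) × Int),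
    raws.foldl (fun st raw => let line := PySem.Str.strip raw;
        if line = "" then st else pvStepB st line) st =
      (raws.filterMap (fun l =>
        if PySem.Str.strip l = "" then none else some (PySem.Str.strip l))).foldl pvStepB st := by
  induction raws with
  | nil => intro st; rfl
  | cons r rs ih =>
      intro st
      by_cases he : PySem.Str.strip r = ""
      · simp only [List.foldl_cons, List.filterMap_cons, he, if_pos]
        exact ih st
      · simp only [List.foldl_cons, List.filterMap_cons, he, ite_false]
        exact ih (pvStepB st (PySem.Str.strip r))

theorem B_eq_pvG (text : String) :
    generate_qa_from_text_by_lines_alt text = pvG (pvLinesA text) := by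
  unfold generate_qa_from_text_by_lines_alt
  simp only [foldB_raw_eq_clean]
  exact foldB_initial (pvLinesA text)

-- ===== VERDICT (by name: the statement is the Claim_ definition above) =====
theorem generate_qa_from_text_by_lines_spec : Claim_equal_generate_qa_from_text_by_lines := by
  intro text _
  unfold Spec_generate_qa_from_text_by_lines
  rw [A_eq_pvG, B_eq_pvG]
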